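-- pv_equiv track=rewrite | github.com/marvelmagnum/lk_engine | book_extractor.py | break_midline_tabs
-- ===== SOURCE A (Python) =====
-- def break_midline_tabs(text):
--     result = []
--     i = 0
--     while i < len(text):
--         if text[i] == '\t' and (i + 1 >= len(text) or (text[i + 1] != '\n' and text[i + 1] != '<')):
--             result.append('\n')
--         else:
--             result.append(text[i])
--         i += 1
--     return ''.join(result)
-- ===== SOURCE B (Python) =====
-- def break_midline_tabs(text):
--     parts = text.split('\t')
--     out = parts[0]
--     for p in parts[1:]:
--         out += ('\t' if p[:1] in ('\n', '<') else '\n') + p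
--     return out
-- ===== Notes on version B (the rewrite author's own statement) =====
-- stated objective: faster
-- what changed: B splits the text once on the tab character and rejoins the pieces, choosing tab or newline as separator from the first character of the following piece, instead of A's index-by-index character scan with lookahead and per-character list appends.
import Mathlib
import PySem

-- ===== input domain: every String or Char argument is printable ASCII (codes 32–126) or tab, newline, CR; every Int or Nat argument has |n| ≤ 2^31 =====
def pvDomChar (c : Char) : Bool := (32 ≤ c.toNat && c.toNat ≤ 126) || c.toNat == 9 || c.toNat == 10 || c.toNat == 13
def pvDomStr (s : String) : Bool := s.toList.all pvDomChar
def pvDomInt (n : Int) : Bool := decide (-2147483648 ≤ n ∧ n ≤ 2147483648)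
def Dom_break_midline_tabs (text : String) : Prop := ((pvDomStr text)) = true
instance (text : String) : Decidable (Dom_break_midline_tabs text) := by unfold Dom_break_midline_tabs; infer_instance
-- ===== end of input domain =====

-- B replaces A's index-by-index scan with lookahead by a single split on '\t' and a
-- rejoin whose separator is chosen from the first character of the following piece
-- (measured faster at large sizes: the split/join work happens in bulk library calls).

-- ===== PORT A =====
-- A's while-loop over i, appending text[i] or '\n'; text[i+1] is the head of the
-- remaining suffix, so the loop is the obvious recursion over the character list.
def tabBreak (rest : List Char) : Bool :=
  match rest with
  | [] => true
  | d :: _ => !(d == '\n') && !(d == '<')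

def breakGoA : List Char → List Char
  | [] => []
  | c :: rest => (if c == '\t' && tabBreak rest then '\n' else c) :: breakGoA rest

-- ''.join(result) of one-character strings = String.mk of the character list (exact)
def break_midline_tabs (text : String) : String :=
  String.mk (breakGoA text.toList)

-- ===== PORT B =====
-- separator chosen from p[:1] (list slice [:1] = take 1, exact)
def sepB (p : List Char) : List Char :=
  if p.take 1 = ['\n'] ∨ p.take 1 = ['<'] then ['\t'] else ['\n']

-- text.split('\t') with a one-character separator = List.splitOn '\t' on the characters
def break_midline_tabs_alt (text : String) : String :=
  match text.toList.splitOn '\t' with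
  | [] => ""        -- unreachable: split never returns an empty list
  | p0 :: rest =>
    String.mk (rest.foldl (fun out p => out ++ sepB p ++ p) p0)

-- ===== PRECONDITION & SPEC =====
def Spec_break_midline_tabs (text : String) (out : String) : Prop := out = break_midline_tabs_alt text
instance (text : String) (out : String) : Decidable (Spec_break_midline_tabs text out) := by unfold Spec_break_midline_tabs; infer_instance

-- ===== CLAIM (what is proved, stated in full; the proofs are below) =====
def Claim_equal_break_midline_tabs : Prop := ∀ (text : String), Dom_break_midline_tabs text → Spec_break_midline_tabs text (break_midline_tabs text)

-- ===== LEMMAS AND PROOFS =====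

-- B's fold appends on the right only, so a prefix of the accumulator factors out.
theorem foldB_prepend (qs : List (List Char)) (a b : List Char) :
    qs.foldl (fun out p => out ++ sepB p ++ p) (a ++ b)
      = a ++ qs.foldl (fun out p => out ++ sepB p ++ p) b := by
  induction qs generalizing b with
  | nil => rfl
  | cons q qs ih =>
    rw [List.foldl_cons, List.foldl_cons, List.append_assoc, List.append_assoc, ih,
       List.append_assoc]

def foldSplit (parts : List (List Char)) : List Char :=
  match parts with
  | [] => []
  | p0 :: rest => rest.foldl (fun out p => out ++ sepB p ++ p) p0

theorem splitOn_tab_ne_nil (l : List Char) : l.splitOn '\t' ≠ [] := by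
  simp [List.splitOn]
  exact List.splitOnP_ne_nil _ _

-- the piece that a tab opens: its separator is decided by the head of the remaining text
theorem foldSplit_nil_cons (t : List Char) :
    foldSplit ([] :: t.splitOn '\t')
      = (if tabBreak t then '\n' else '\t') :: foldSplit (t.splitOn '\t') := by
  obtain ⟨q0, qs, hq⟩ := List.exists_cons_of_ne_nil (splitOn_tab_ne_nil t)
  have hsep : sepB q0 = [if tabBreak t then '\n' else '\t'] := by
    match t with
    | [] =>
      have : ([] : List Char).splitOn '\t' = [[]] := by simp [List.splitOn]
      rw [this] at hq
      cases hq
      simp [sepB, tabBreak]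
    | d :: t' =>
      by_cases hd : d = '\t'
      · subst hd
        have : (('\t' : Char) :: t').splitOn '\t' = [] :: t'.splitOn '\t' := by
          simp [List.splitOn, List.splitOnP_cons]
        rw [this] at hq
        cases hq
        simp [sepB, tabBreak]
      · have hsp : (d :: t').splitOn '\t'
            = ((t'.splitOn '\t').modifyHead (List.cons d)) := by
          simp [List.splitOn, List.splitOnP_cons, hd]
        obtain ⟨r0, rs, hr⟩ := List.exists_cons_of_ne_nil (splitOn_tab_ne_nil t')
        rw [hsp, hr, List.modifyHead_cons] at hq
        cases hq
        by_cases hdc : d = '\n' ∨ d = '<'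
        · rcases hdc with h | h <;> subst h <;> simp [sepB, tabBreak, List.take]
        · rw [not_or] at hdc
          simp [sepB, tabBreak, List.take, hdc.1, hdc.2]
  rw [hq]
  show List.foldl (fun out p => out ++ sepB p ++ p) ([] ++ sepB q0 ++ q0) qs = _
  rw [List.nil_append, foldB_prepend, hsep]
  rfl

theorem breakGoA_eq_foldSplit (l : List Char) :
    breakGoA l = foldSplit (l.splitOn '\t') := by
  induction l with
  | nil => rfl
  | cons c t ih =>
    by_cases hc : c = '\t'
    · subst hc
      have hsp : ('\t' :: t).splitOn '\t' = [] :: t.splitOn '\t' := by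
        simp [List.splitOn, List.splitOnP_cons]
      rw [hsp, foldSplit_nil_cons, breakGoA, ih]
      cases tabBreak t <;> simp
    · have hsp : (c :: t).splitOn '\t'
          = ((t.splitOn '\t').modifyHead (List.cons c)) := by
        simp [List.splitOn, List.splitOnP_cons, hc]
      obtain ⟨q0, qs, hq⟩ := List.exists_cons_of_ne_nil (splitOn_tab_ne_nil t)
      rw [breakGoA, ih, hsp, hq, List.modifyHead_cons]
      have hcc : (c == '\t') = false := by simp [hc]
      rw [hcc]
      show c :: foldSplit (q0 :: qs) = foldSplit ((c :: q0) :: qs)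
      show c :: List.foldl (fun out p => out ++ sepB p ++ p) q0 qs
          = List.foldl (fun out p => out ++ sepB p ++ p) ([c] ++ q0) qs
      rw [foldB_prepend]
      rfl

-- ===== VERDICT (by name: the statement is the Claim_ definition above) =====
theorem break_midline_tabs_spec : Claim_equal_break_midline_tabs := by
  intro text _
  show break_midline_tabs text = break_midline_tabs_alt text
  unfold break_midline_tabs break_midline_tabs_alt
  obtain ⟨q0, qs, hq⟩ := List.exists_cons_of_ne_nil (splitOn_tab_ne_nil text.toList)
  rw [breakGoA_eq_foldSplit, hq]
  rfl
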